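-- pv_equiv track=rewrite | github.com/sevaivanov/myself | kedfilms/utils.py | get_list_next_previous_as_two_dimentional_dict
-- ===== SOURCE A (Python) =====
-- def get_list_next_previous_as_two_dimentional_dict(alist=None):
--     """
--         Make two dimentional dict from list with last & next as sub-dict.
--     """
--
--     if not alist:
--         return None
--
--     adict = {}
--
--     for index in range(len(alist)):
--         item = alist[index][0]
--
--         if len(alist) == 1:
--             last = ""
--             next = ""
--         else:
--             if index == 0:
--                 last = alist[len(alist) - 1][0]
--                 next = alist[index + 1][0]
--
--             elif index == len(alist) - 1:
--                 last =  alist[index - 1][0]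
--                 next = alist[0][0]
--
--             else:
--                 last = alist[index - 1][0]
--                 next = alist[index + 1][0]
--
--         adict[item] = {'last': last, 'next': next}
--
--     return adict
-- ===== SOURCE B (Python) =====
-- def get_list_next_previous_as_two_dimentional_dict(alist=None):
--     """
--         Make two dimentional dict from list with last & next as sub-dict.
--     """
--     if not alist:
--         return None
--
--     keys = [x[0] for x in alist]
--
--     if len(keys) == 1:
--         return {keys[0]: {'last': '', 'next': ''}}
--
--     lasts = [keys[-1]] + keys[:-1]
--     nexts = keys[1:] + [keys[0]]
--
--     return {k: {'last': l, 'next': n}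
--             for k, l, n in zip(keys, lasts, nexts)}
-- ===== Notes on version B (the rewrite author's own statement) =====
-- stated objective: simpler
-- what changed: Replaces the per-index first/middle/last branching over range(len(alist)) by extracting the key list once and zipping it with its two rotations, assembling the result in a single dict comprehension.
import Mathlib
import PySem

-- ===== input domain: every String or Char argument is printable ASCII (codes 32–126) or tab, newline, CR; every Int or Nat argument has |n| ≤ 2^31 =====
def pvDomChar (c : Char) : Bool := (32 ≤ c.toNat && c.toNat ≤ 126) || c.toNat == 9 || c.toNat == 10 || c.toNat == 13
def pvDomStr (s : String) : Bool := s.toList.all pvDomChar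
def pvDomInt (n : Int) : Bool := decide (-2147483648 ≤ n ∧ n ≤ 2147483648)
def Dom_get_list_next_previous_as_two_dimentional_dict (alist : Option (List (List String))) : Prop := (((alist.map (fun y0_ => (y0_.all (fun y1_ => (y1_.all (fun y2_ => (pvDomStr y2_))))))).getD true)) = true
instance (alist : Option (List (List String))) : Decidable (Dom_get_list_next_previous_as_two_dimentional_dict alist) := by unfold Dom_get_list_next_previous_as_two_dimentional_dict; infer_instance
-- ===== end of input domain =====

-- B extracts the key list once and zips it with its two rotations instead of branching
-- per index on first/middle/last; objective: simpler.


-- ===== PORT A =====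
-- alist[index][0] on Pre_ (all rows nonempty, indices produced in range): pyGetD defaults are never hit.
def get_list_next_previous_as_two_dimentional_dict (alist : Option (List (List String))) : Option (List (String × List (String × String))) :=
  match alist with
  | none => none
  | some xs =>
    if xs = [] then none
    else
      let adict : PySem.Dict String (List (String × String)) :=
        (PySem.List.pyRange 0 (xs.length : Int) 1).foldl
          (fun d index =>
            let item := PySem.List.pyGetD (PySem.List.pyGetD xs index []) 0 ""
            let last :=
              if (xs.length : Int) = 1 then ""
              else if index = 0 then PySem.List.pyGetD (PySem.List.pyGetD xs ((xs.length : Int) - 1) []) 0 ""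
              else if index = (xs.length : Int) - 1 then PySem.List.pyGetD (PySem.List.pyGetD xs (index - 1) []) 0 ""
              else PySem.List.pyGetD (PySem.List.pyGetD xs (index - 1) []) 0 ""
            let next :=
              if (xs.length : Int) = 1 then ""
              else if index = 0 then PySem.List.pyGetD (PySem.List.pyGetD xs (index + 1) []) 0 ""
              else if index = (xs.length : Int) - 1 then PySem.List.pyGetD (PySem.List.pyGetD xs 0 []) 0 ""
              else PySem.List.pyGetD (PySem.List.pyGetD xs (index + 1) []) 0 ""
            d.insert item [("last", last), ("next", next)])
          PySem.Dict.empty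
      some adict.items

-- ===== PORT B =====
def get_list_next_previous_as_two_dimentional_dict_alt (alist : Option (List (List String))) : Option (List (String × List (String × String))) :=
  match alist with
  | none => none
  | some xs =>
    if xs = [] then none
    else
      let keys := xs.map (fun x => PySem.List.pyGetD x 0 "")
      if keys.length = 1 then
        some [(PySem.List.pyGetD keys 0 "", [("last", ""), ("next", "")])]
      else
        let lasts := PySem.List.pyGetD keys (-1) "" :: PySem.List.slice keys none (some (-1))
        let nexts := PySem.List.slice keys (some 1) none ++ [PySem.List.pyGetD keys 0 ""]
        some (((keys.zip (lasts.zip nexts)).foldl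
          (fun (d : PySem.Dict String (List (String × String))) kln =>
            d.insert kln.1 [("last", kln.2.1), ("next", kln.2.2)])
          PySem.Dict.empty).items)

-- ===== PRECONDITION & SPEC =====
-- Pre_ excludes inputs where some row is empty: there alist[index][0] raises IndexError in A (and B raises too).
def Pre_get_list_next_previous_as_two_dimentional_dict (alist : Option (List (List String))) : Prop :=
  ∀ x ∈ alist.getD [], x ≠ []
instance (alist : Option (List (List String))) : Decidable (Pre_get_list_next_previous_as_two_dimentional_dict alist) := by unfold Pre_get_list_next_previous_as_two_dimentional_dict; infer_instance
def pvWitness_get_list_next_previous_as_two_dimentional_dict : Option (List (List String)) := some [["a"], ["b"], ["c"]]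
def Spec_get_list_next_previous_as_two_dimentional_dict (alist : Option (List (List String))) (out : Option (List (String × List (String × String)))) : Prop := out = get_list_next_previous_as_two_dimentional_dict_alt alist
instance (alist : Option (List (List String))) (out : Option (List (String × List (String × String)))) : Decidable (Spec_get_list_next_previous_as_two_dimentional_dict alist out) := by unfold Spec_get_list_next_previous_as_two_dimentional_dict; infer_instance

-- ===== CLAIM (what is proved, stated in full; the proofs are below) =====
def Claim_equal_get_list_next_previous_as_two_dimentional_dict : Prop := ∀ (alist : Option (List (List String))), Dom_get_list_next_previous_as_two_dimentional_dict alist → Pre_get_list_next_previous_as_two_dimentional_dict alist → Spec_get_list_next_previous_as_two_dimentional_dict alist (get_list_next_previous_as_two_dimentional_dict alist)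

-- ===== LEMMAS AND PROOFS =====

-- the per-index triple A produces (key, last, next) for n ≥ 2, as fn of Int index
def tripleA (xs : List (List String)) (i : Int) : String × String × String :=
  (PySem.List.pyGetD (PySem.List.pyGetD xs i []) 0 "",
   (if (xs.length : Int) = 1 then ""
    else if i = 0 then PySem.List.pyGetD (PySem.List.pyGetD xs ((xs.length : Int) - 1) []) 0 ""
    else if i = (xs.length : Int) - 1 then PySem.List.pyGetD (PySem.List.pyGetD xs (i - 1) []) 0 ""
    else PySem.List.pyGetD (PySem.List.pyGetD xs (i - 1) []) 0 "",
    if (xs.length : Int) = 1 then ""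
    else if i = 0 then PySem.List.pyGetD (PySem.List.pyGetD xs (i + 1) []) 0 ""
    else if i = (xs.length : Int) - 1 then PySem.List.pyGetD (PySem.List.pyGetD xs 0 []) 0 ""
    else PySem.List.pyGetD (PySem.List.pyGetD xs (i + 1) []) 0 ""))

lemma pv_pairs_eq (xs : List (List String)) (h2 : 2 ≤ xs.length) :
    (PySem.List.pyRange 0 (xs.length : Int) 1).map (tripleA xs)
      = (xs.map fun x => PySem.List.pyGetD x 0 "").zip
          ((PySem.List.pyGetD (xs.map fun x => PySem.List.pyGetD x 0 "") (-1) ""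
              :: PySem.List.slice (xs.map fun x => PySem.List.pyGetD x 0 "") none (some (-1))).zip
            (PySem.List.slice (xs.map fun x => PySem.List.pyGetD x 0 "") (some 1) none
              ++ [PySem.List.pyGetD (xs.map fun x => PySem.List.pyGetD x 0 "") 0 ""])) := by
  set keys := xs.map fun x => PySem.List.pyGetD x 0 "" with hkeys
  have hlen : keys.length = xs.length := by simp [hkeys]
  have hne : keys ≠ [] := by
    intro h; rw [h] at hlen; simp at hlen; omega
  rw [PySem.List.slice_to_neg_one, PySem.List.slice_from_one, PySem.List.pyGetD_neg_one _ _ hne, PySem.List.pyGetD_zero]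
  apply List.ext_getElem
  · simp [PySem.List.length_pyRange_one, hlen]
    omega
  · intro k h1 h1'
    have hk : k < xs.length := by
      simpa [PySem.List.length_pyRange_one] using h1
    simp only [List.getElem_map, PySem.List.getElem_pyRange_one, List.getElem_zip, zero_add]
    have hG : ∀ (m : Nat) (hm : m < xs.length),
        PySem.List.pyGetD (PySem.List.pyGetD xs (m : Int) []) 0 "" = keys[m]'(by omega) := by
      intro m hm
      rw [PySem.List.pyGetD_natCast, List.getD_eq_getElem _ _ hm]
      simp [hkeys]
    have hn1 : ¬((xs.length : Int) = 1) := by omega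
    unfold tripleA
    rw [if_neg hn1, if_neg hn1]
    simp only [Prod.mk.injEq]
    refine ⟨?_, ?_, ?_⟩
    · exact hG k hk
    · by_cases hk0 : k = 0
      · subst hk0
        rw [if_pos (by norm_num)]
        have hc : (xs.length : Int) - 1 = ((xs.length - 1 : Nat) : Int) := by omega
        rw [hc, hG (xs.length - 1) (by omega)]
        simp [List.getLast_eq_getElem, hlen]
      · obtain ⟨j, rfl⟩ := Nat.exists_eq_succ_of_ne_zero hk0
        rw [if_neg (by omega), ite_self]
        have hc : ((j + 1 : Nat) : Int) - 1 = ((j : Nat) : Int) := by omega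
        rw [hc, hG j (by omega)]
        simp [List.getElem_dropLast]
    · by_cases hkl : k = xs.length - 1
      · subst hkl
        rw [if_neg (by omega), if_pos (by omega)]
        have h0 := hG 0 (by omega)
        simp only [Nat.cast_zero] at h0
        rw [h0, List.getElem_append_right (by simp [hlen])]
        simp [hlen, List.getD, List.getElem?_eq_getElem (show 0 < keys.length by omega)]
      · have hb : (if ((k : Nat) : Int) = 0 then PySem.List.pyGetD (PySem.List.pyGetD xs ((k : Int) + 1) []) 0 ""
            else if ((k : Nat) : Int) = (xs.length : Int) - 1 then PySem.List.pyGetD (PySem.List.pyGetD xs 0 []) 0 ""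
            else PySem.List.pyGetD (PySem.List.pyGetD xs ((k : Int) + 1) []) 0 "")
            = PySem.List.pyGetD (PySem.List.pyGetD xs ((k : Int) + 1) []) 0 "" := by
          by_cases h0 : ((k : Nat) : Int) = 0
          · rw [if_pos h0]
          · rw [if_neg h0, if_neg (by omega)]
        rw [hb]
        have hc : (k : Int) + 1 = ((k + 1 : Nat) : Int) := by omega
        rw [hc, hG (k + 1) (by omega)]
        rw [List.getElem_append_left (by simp [hlen]; omega)]
        simp [List.getElem_tail]


theorem get_list_next_previous_as_two_dimentional_dict_witness_ok :
    Dom_get_list_next_previous_as_two_dimentional_dict pvWitness_get_list_next_previous_as_two_dimentional_dict ∧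
    Pre_get_list_next_previous_as_two_dimentional_dict pvWitness_get_list_next_previous_as_two_dimentional_dict := by
  constructor <;> decide

-- ===== VERDICT (by name: the statement is the Claim_ definition above) =====
theorem get_list_next_previous_as_two_dimentional_dict_spec : Claim_equal_get_list_next_previous_as_two_dimentional_dict := by
  intro alist _hDom _hPre
  unfold Spec_get_list_next_previous_as_two_dimentional_dict
  cases alist with
  | none => rfl
  | some xs =>
    by_cases hxs : xs = []
    · simp [get_list_next_previous_as_two_dimentional_dict, get_list_next_previous_as_two_dimentional_dict_alt, hxs]
    · simp only [get_list_next_previous_as_two_dimentional_dict, get_list_next_previous_as_two_dimentional_dict_alt, if_neg hxs]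
      by_cases h1 : xs.length = 1
      · obtain ⟨x, rfl⟩ := List.length_eq_one_iff.mp h1
        rw [show (([x] : List (List String)).length : Int) = 1 by simp]
        rw [show PySem.List.pyRange 0 1 1 = [0] by decide]
        simp only [List.foldl_cons, List.foldl_nil]
        norm_num [PySem.List.pyGetD_zero_cons]
        rfl
      · have h2 : 2 ≤ xs.length := by
          have : xs.length ≠ 0 := by simpa using hxs
          omega
        rw [if_neg (by simpa using h1)]
        have hpairs := pv_pairs_eq xs h2
        refine congrArg some (congrArg PySem.Dict.items ?_)
        rw [← hpairs, List.foldl_map]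
        rfl
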